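-- pv_equiv track=rewrite | github.com/jhschwartz/dimerDB | scripts/derive_all_possible_heterodimers.py | derive_heterodimers_from_assembly_groups
-- ===== SOURCE A (Python) =====
-- import itertools
--
-- def derive_heterodimers_from_assembly_groups(groups):
--     heterodimers = {}
--
--     for monomers_of_one_assembly in groups:
--
--         pairs = itertools.combinations(monomers_of_one_assembly, 2)
--
--         for p in pairs:
--             m0_uniparc = p[0][0]
--             m1_uniparc = p[1][0]
--             m0_pdb = p[0][1] + '_' + p[0][2]
--             m1_pdb = p[1][1] + '_' + p[1][2]
--
--             # only consider heterodimers, i.e. where uniparcs aren't equal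
--             if m0_uniparc != m1_uniparc:
--                 # naming convention is alphabetical by uniparc
--                 if m0_uniparc < m1_uniparc:
--                     uniparc_pair = f'{m0_uniparc}-{m1_uniparc}'
--                     pdb_pair = f'{m0_pdb}-{m1_pdb}'
--                 else:
--                     uniparc_pair = f'{m1_uniparc}-{m0_uniparc}'
--                     pdb_pair = f'{m1_pdb}-{m0_pdb}'
--
--                 if uniparc_pair in heterodimers:
--                     heterodimers[uniparc_pair].add(pdb_pair)
--                 else:
--                     heterodimers[uniparc_pair] = set([pdb_pair])
--
--     for uniparc_pair, chain_pairs in heterodimers.items():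
--         heterodimers[uniparc_pair] = sorted(list(chain_pairs))
--
--     return heterodimers
-- ===== SOURCE B (Python) =====
-- import itertools
--
-- def derive_heterodimers_from_assembly_groups(groups):
--     heterodimers = {}
--
--     for group in groups:
--         # bucket the group's monomers by uniparc: uniparc -> list of 'pdb_chain' strings
--         by_uniparc = {}
--         for uniparc, pdb, chain in group:
--             by_uniparc.setdefault(uniparc, []).append(pdb + '_' + chain)
--
--         # every unordered pair of DISTINCT uniparcs is a heterodimer; cross the buckets
--         for u, v in itertools.combinations(by_uniparc, 2):
--             if v < u:
--                 u, v = v, u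
--             key = u + '-' + v
--             chain_pairs = heterodimers.setdefault(key, set())
--             chain_pairs.update(p + '-' + q
--                                for p in by_uniparc[u] for q in by_uniparc[v])
--
--     return {key: sorted(pairs) for key, pairs in heterodimers.items()}
-- ===== Notes on version B (the rewrite author's own statement) =====
-- stated objective: alternative
-- what changed: B groups each assembly's monomers into a dict keyed by uniparc and forms heterodimers by crossing the buckets of each itertools.combinations pair of DISTINCT uniparc keys, instead of A's enumerate-every-monomer-pair-then-filter-equal-uniparcs loop.
import Mathlib
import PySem

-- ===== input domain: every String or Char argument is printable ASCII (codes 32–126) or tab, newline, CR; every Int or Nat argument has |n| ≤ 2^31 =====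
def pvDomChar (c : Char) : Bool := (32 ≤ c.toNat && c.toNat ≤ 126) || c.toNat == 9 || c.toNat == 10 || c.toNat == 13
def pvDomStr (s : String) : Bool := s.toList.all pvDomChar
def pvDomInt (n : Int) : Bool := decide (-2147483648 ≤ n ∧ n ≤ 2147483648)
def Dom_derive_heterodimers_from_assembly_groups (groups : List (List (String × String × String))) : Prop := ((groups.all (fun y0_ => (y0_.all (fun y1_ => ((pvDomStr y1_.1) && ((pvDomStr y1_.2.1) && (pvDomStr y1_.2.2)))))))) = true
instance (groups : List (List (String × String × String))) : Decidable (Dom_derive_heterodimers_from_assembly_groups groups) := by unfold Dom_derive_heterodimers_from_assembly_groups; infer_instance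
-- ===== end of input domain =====

-- B buckets each group's monomers by uniparc in a dict and crosses the buckets of each pair of
-- DISTINCT uniparc keys, instead of A's enumerate-all-monomer-pairs-then-filter; same results,
-- an alternative data-structure-driven decomposition.

-- ===== PORT A =====
-- A-side helper: the body of A's inner loop over itertools.combinations(group, 2)
-- (PySem.List.combinations; each member is a 2-element list matched as the pair p —
-- the '_' branch is unreachable since every member of combinations g 2 has length 2).
def pvStepA (d : PySem.Dict String (PySem.Set String)) (p : List (String × String × String)) :
    PySem.Dict String (PySem.Set String) :=
  match p with
  | [m0, m1] =>
    let m0u := m0.1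
    let m1u := m1.1
    let m0p := m0.2.1 ++ "_" ++ m0.2.2
    let m1p := m1.2.1 ++ "_" ++ m1.2.2
    if m0u ≠ m1u then
      let up_pp : String × String :=
        if m0u < m1u then (m0u ++ "-" ++ m1u, m0p ++ "-" ++ m1p)
        else (m1u ++ "-" ++ m0u, m1p ++ "-" ++ m0p)
      match d.get? up_pp.1 with
      | some s => d.insert up_pp.1 (PySem.Set.add s up_pp.2)
      | none => d.insert up_pp.1 (PySem.Set.ofList [up_pp.2])
    else d
  | _ => d

-- Literal port of A: the nested loops build the dict heterodimers (uniparc_pair -> set of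
-- pdb_pair); A's final loop reassigns heterodimers[k] = sorted(list(set)) for every key in
-- place, i.e. maps over the items.
def derive_heterodimers_from_assembly_groups (groups : List (List (String × String × String))) : List (String × List String) :=
  (groups.foldl (fun d monomers_of_one_assembly =>
      (PySem.List.combinations monomers_of_one_assembly 2).foldl pvStepA d)
    PySem.Dict.empty).items.map (fun kv => (kv.1, PySem.List.sorted kv.2 (fun x => x) false))

-- ===== PORT B =====
-- Literal port of B: per group, by_uniparc = dict uniparc -> list of 'pdb_chain' strings
-- (setdefault+append = modify with []), then for each pair of distinct keys from
-- itertools.combinations(by_uniparc, 2) (a 2-element list, matched; '_' unreachable) swap to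
-- alphabetical order and update the set heterodimers.setdefault(key, set()) with the cross
-- product of the two buckets; finally sorted(pairs) per key over the items.
def derive_heterodimers_from_assembly_groups_alt (groups : List (List (String × String × String))) : List (String × List String) :=
  (groups.foldl (fun heterodimers group =>
      let byU : PySem.Dict String (List String) :=
        group.foldl (fun d m => d.modify m.1 [] (fun l => l ++ [m.2.1 ++ "_" ++ m.2.2])) PySem.Dict.empty
      (PySem.List.combinations byU.keys 2).foldl (fun het uv =>
        match uv with
        | [u0, v0] =>
          let u := if v0 < u0 then v0 else u0
          let v := if v0 < u0 then u0 else v0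
          het.modify (u ++ "-" ++ v) [] (fun chain_pairs =>
            PySem.Set.update chain_pairs
              ((byU.getD u []).flatMap (fun p => (byU.getD v []).map (fun q => p ++ "-" ++ q))))
        | _ => het) heterodimers)
    PySem.Dict.empty).items.map (fun kv => (kv.1, PySem.List.sorted kv.2 (fun x => x) false))

-- ===== PRECONDITION & SPEC =====
def Spec_derive_heterodimers_from_assembly_groups (groups : List (List (String × String × String))) (out : List (String × List String)) : Prop := out = derive_heterodimers_from_assembly_groups_alt groups
instance (groups : List (List (String × String × String))) (out : List (String × List String)) : Decidable (Spec_derive_heterodimers_from_assembly_groups groups out) := by unfold Spec_derive_heterodimers_from_assembly_groups; infer_instance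

-- ===== CLAIM (what is proved, stated in full; the proofs are below) =====
def Claim_equal_derive_heterodimers_from_assembly_groups : Prop := ∀ (groups : List (List (String × String × String))), Dom_derive_heterodimers_from_assembly_groups groups → Spec_derive_heterodimers_from_assembly_groups groups (derive_heterodimers_from_assembly_groups groups)

-- ===== LEMMAS AND PROOFS =====

-- ---- shared proof-land vocabulary ----

-- the canonical (uniparc_pair, pdb_pair) event of one ordered monomer pair (none: same uniparc)
def pvEvent (m0 m1 : String × String × String) : Option (String × String) :=
  if m0.1 = m1.1 then none
  else if m0.1 < m1.1 then
    some (m0.1 ++ "-" ++ m1.1, (m0.2.1 ++ "_" ++ m0.2.2) ++ "-" ++ (m1.2.1 ++ "_" ++ m1.2.2))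
  else
    some (m1.1 ++ "-" ++ m0.1, (m1.2.1 ++ "_" ++ m1.2.2) ++ "-" ++ (m0.2.1 ++ "_" ++ m0.2.2))

def pvEventL (c : List (String × String × String)) : Option (String × String) :=
  match c with
  | [m0, m1] => pvEvent m0 m1
  | _ => none

-- the events one group contributes, in A's combinations order
def pvEvents (g : List (String × String × String)) : List (String × String) :=
  (PySem.List.combinations g 2).filterMap pvEventL

-- A's dict update for one event
def pvUpdA (d : PySem.Dict String (PySem.Set String)) (e : String × String) : PySem.Dict String (PySem.Set String) :=
  d.modify e.1 [] (fun s => PySem.Set.add s e.2)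

-- B-side vocabulary
def pvPdb (m : String × String × String) : String := m.2.1 ++ "_" ++ m.2.2

def pvByU (g : List (String × String × String)) : PySem.Dict String (List String) :=
  g.foldl (fun d m => d.modify m.1 [] (fun l => l ++ [m.2.1 ++ "_" ++ m.2.2])) PySem.Dict.empty

-- the block B builds from one 2-element key combination
def pvBlk (byU : PySem.Dict String (List String)) (c : List String) : Option (String × List String) :=
  match c with
  | [u0, v0] =>
    let u := if v0 < u0 then v0 else u0
    let v := if v0 < u0 then u0 else v0
    some (u ++ "-" ++ v, (byU.getD u []).flatMap (fun p => (byU.getD v []).map (fun q => p ++ "-" ++ q)))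
  | _ => none

def pvBlocks (g : List (String × String × String)) : List (String × List String) :=
  (PySem.List.combinations (pvByU g).keys 2).filterMap (pvBlk (pvByU g))

-- B's dict update for one block
def pvUpdB (d : PySem.Dict String (PySem.Set String)) (b : String × List String) : PySem.Dict String (PySem.Set String) :=
  d.modify b.1 [] (fun s => PySem.Set.update s b.2)

-- name vocabulary (uniparc strings only)
def pvKeyStr (u v : String) : String := if u < v then u ++ "-" ++ v else v ++ "-" ++ u
def pvNm (u v : String) : Option String := if u = v then none else some (pvKeyStr u v)
def pvNmL (c : List String) : Option String := match c with | [u, v] => pvNm u v | _ => none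
def pvPN (l : List String) : List String := (PySem.List.combinations l 2).filterMap pvNmL

-- apply an update only when the optional event is present
def pvOptStep {δ ε : Type} (u : δ → ε → δ) (d : δ) (o : Option ε) : δ :=
  match o with | some e => u d e | none => d

-- the canonical shapes both ports are reduced to
def pvCanon (E : List (String × String)) : List (String × List String) :=
  (PySem.Set.ofList (E.map Prod.fst)).map (fun k =>
    (k, PySem.List.sorted (PySem.Set.ofList ((E.filter (fun p => p.1 == k)).map Prod.snd)) (fun x => x) false))

def pvCanonB (F : List (String × List String)) : List (String × List String) :=
  (PySem.Set.ofList (F.map Prod.fst)).map (fun k =>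
    (k, PySem.List.sorted (PySem.Set.ofList (((F.filter (fun b => b.1 == k)).map Prod.snd).flatten)) (fun x => x) false))

-- ---- generic fold bookkeeping ----

lemma pvFoldl_match_filterMap {γ δ ε : Type} (f : γ → Option ε) (u : δ → ε → δ) :
    ∀ (l : List γ) (d : δ),
      l.foldl (fun d c => pvOptStep u d (f c)) d
        = (l.filterMap f).foldl u d := by
  intro l
  induction l with
  | nil => intro d; rfl
  | cons c t ih =>
    intro d
    rw [List.foldl_cons, List.filterMap_cons]
    show List.foldl (fun d c => pvOptStep u d (f c)) (pvOptStep u d (f c)) t = _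
    cases h : f c
    · exact ih d
    · rw [List.foldl_cons]; exact ih _

-- ---- A reduced to pvCanon ----

-- "get-then-insert-or-create" is "insert the default-extended set"
lemma pvUpd_eq (d : PySem.Dict String (PySem.Set String)) (k v : String) :
    (match d.get? k with
     | some s => d.insert k (PySem.Set.add s v)
     | none => d.insert k (PySem.Set.ofList [v]))
      = d.insert k (PySem.Set.add (d.getD k []) v) := by
  cases hg : d.get? k with
  | some s => rw [PySem.Dict.getD_of_get?_eq_some _ _ hg]
  | none => rw [PySem.Dict.getD_eq_get?_getD, hg]; rfl

-- A's inner-loop body is pvUpdA driven by pvEventL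
lemma pvStepA_eq (d : PySem.Dict String (PySem.Set String)) (c : List (String × String × String)) :
    pvStepA d c = pvOptStep pvUpdA d (pvEventL c) := by
  rcases c with _ | ⟨m0, _ | ⟨m1, _ | t⟩⟩ <;> try rfl
  simp only [pvStepA, pvOptStep, pvEventL, pvEvent, pvUpdA, PySem.Dict.modify]
  by_cases h01 : m0.1 = m1.1
  · simp [h01]
  · by_cases hlt : m0.1 < m1.1 <;>
      simp only [h01, hlt, ne_eq, not_false_iff, if_true, if_false] <;>
      rw [pvUpd_eq]

-- getD after A's modify-with-Set.add fold: the starting set updated with the values at that key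
lemma pvGetD_foldl_setAdd : ∀ (l : List (String × String)) (d : PySem.Dict String (PySem.Set String)) (c : String),
    (l.foldl pvUpdA d).getD c []
      = PySem.Set.update (d.getD c []) ((l.filter (fun p => p.1 == c)).map Prod.snd) := by
  intro l
  induction l with
  | nil => intro d c; rfl
  | cons e t ih =>
    intro d c
    rw [List.foldl_cons, List.filter_cons, ih]
    by_cases h : e.1 = c
    · subst h
      simp only [beq_self_eq_true, if_true, List.map_cons, PySem.Set.update_cons]
      rw [pvUpdA, PySem.Dict.getD_modify_self]
    · have hb : (e.1 == c) = false := by simp [h]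
      simp only [hb, Bool.false_eq_true, if_false]
      rw [pvUpdA, PySem.Dict.getD_modify_of_ne]
      exact fun hc => h hc.symm

lemma pvA_eq_canon (groups : List (List (String × String × String))) :
    derive_heterodimers_from_assembly_groups groups = pvCanon (groups.flatMap pvEvents) := by
  unfold derive_heterodimers_from_assembly_groups
  have hdict : groups.foldl (fun d monomers_of_one_assembly =>
        (PySem.List.combinations monomers_of_one_assembly 2).foldl pvStepA d) PySem.Dict.empty
      = (groups.flatMap pvEvents).foldl pvUpdA PySem.Dict.empty := by
    rw [List.foldl_flatMap]
    refine List.foldl_ext _ _ _ (fun d g _ => ?_)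
    rw [pvEvents, ← pvFoldl_match_filterMap pvEventL pvUpdA]
    exact List.foldl_ext _ _ _ (fun d' c _ => pvStepA_eq d' c)
  rw [hdict]
  set E := groups.flatMap pvEvents with hE
  have hnodup : ((E.foldl pvUpdA PySem.Dict.empty).keys).Nodup := by
    unfold pvUpdA
    exact PySem.Dict.nodup_keys_foldl_modify_key E Prod.fst []
      (fun d e s => PySem.Set.add s e.2) PySem.Dict.empty (by simp)
  have hkeys : (E.foldl pvUpdA PySem.Dict.empty).keys = PySem.Set.ofList (E.map Prod.fst) := by
    unfold pvUpdA
    rw [PySem.Dict.keys_foldl_modify_key E Prod.fst [] (fun d e s => PySem.Set.add s e.2)]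
    simp [PySem.Dict.keys_empty, PySem.Set.update_nil_left]
  rw [PySem.Dict.items_eq_map_keys _ hnodup [], hkeys, pvCanon, List.map_map]
  refine List.map_congr_left (fun k _ => ?_)
  simp only [Function.comp_apply]
  rw [pvGetD_foldl_setAdd E PySem.Dict.empty k]
  simp [PySem.Dict.getD_empty, PySem.Set.update_nil_left]

-- ---- B reduced to pvCanonB ----

-- B's inner-loop body is pvUpdB driven by pvBlk
lemma pvStepB_eq (byU : PySem.Dict String (List String)) (het : PySem.Dict String (PySem.Set String))
    (c : List String) :
    (match c with
      | [u0, v0] =>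
        let u := if v0 < u0 then v0 else u0
        let v := if v0 < u0 then u0 else v0
        het.modify (u ++ "-" ++ v) [] (fun chain_pairs =>
          PySem.Set.update chain_pairs
            ((byU.getD u []).flatMap (fun p => (byU.getD v []).map (fun q => p ++ "-" ++ q))))
      | _ => het)
      = pvOptStep pvUpdB het (pvBlk byU c) := by
  rcases c with _ | ⟨u0, _ | ⟨v0, _ | t⟩⟩ <;> rfl

-- getD after B's modify-with-Set.update fold
lemma pvGetD_foldl_setUpdate : ∀ (l : List (String × List String)) (d : PySem.Dict String (PySem.Set String)) (c : String),
    (l.foldl pvUpdB d).getD c []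
      = PySem.Set.update (d.getD c []) (((l.filter (fun b => b.1 == c)).map Prod.snd).flatten) := by
  intro l
  induction l with
  | nil => intro d c; rfl
  | cons b t ih =>
    intro d c
    rw [List.foldl_cons, List.filter_cons, ih]
    by_cases h : b.1 = c
    · subst h
      simp only [beq_self_eq_true, if_true, List.map_cons, List.flatten_cons]
      rw [PySem.Set.update_append, pvUpdB, PySem.Dict.getD_modify_self]
    · have hb : (b.1 == c) = false := by simp [h]
      simp only [hb, Bool.false_eq_true, if_false]
      rw [pvUpdB, PySem.Dict.getD_modify_of_ne]
      exact fun hc => h hc.symm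

lemma pvB_eq_canonB (groups : List (List (String × String × String))) :
    derive_heterodimers_from_assembly_groups_alt groups = pvCanonB (groups.flatMap pvBlocks) := by
  unfold derive_heterodimers_from_assembly_groups_alt
  have hdict : groups.foldl (fun heterodimers group =>
      let byU : PySem.Dict String (List String) :=
        group.foldl (fun d m => d.modify m.1 [] (fun l => l ++ [m.2.1 ++ "_" ++ m.2.2])) PySem.Dict.empty
      (PySem.List.combinations byU.keys 2).foldl (fun het uv =>
        match uv with
        | [u0, v0] =>
          let u := if v0 < u0 then v0 else u0
          let v := if v0 < u0 then u0 else v0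
          het.modify (u ++ "-" ++ v) [] (fun chain_pairs =>
            PySem.Set.update chain_pairs
              ((byU.getD u []).flatMap (fun p => (byU.getD v []).map (fun q => p ++ "-" ++ q))))
        | _ => het) heterodimers) PySem.Dict.empty
      = (groups.flatMap pvBlocks).foldl pvUpdB PySem.Dict.empty := by
    rw [List.foldl_flatMap]
    refine List.foldl_ext _ _ _ (fun d g _ => ?_)
    rw [pvBlocks, ← pvFoldl_match_filterMap (pvBlk (pvByU g)) pvUpdB]
    exact List.foldl_ext _ _ _ (fun d' c _ => pvStepB_eq (pvByU g) d' c)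
  rw [hdict]
  set F := groups.flatMap pvBlocks with hF
  have hnodup : ((F.foldl pvUpdB PySem.Dict.empty).keys).Nodup := by
    unfold pvUpdB
    exact PySem.Dict.nodup_keys_foldl_modify_key F Prod.fst []
      (fun d b s => PySem.Set.update s b.2) PySem.Dict.empty (by simp)
  have hkeys : (F.foldl pvUpdB PySem.Dict.empty).keys = PySem.Set.ofList (F.map Prod.fst) := by
    unfold pvUpdB
    rw [PySem.Dict.keys_foldl_modify_key F Prod.fst [] (fun d b s => PySem.Set.update s b.2)]
    simp [PySem.Dict.keys_empty, PySem.Set.update_nil_left]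
  rw [PySem.Dict.items_eq_map_keys _ hnodup [], hkeys, pvCanonB, List.map_map]
  refine List.map_congr_left (fun k _ => ?_)
  simp only [Function.comp_apply]
  rw [pvGetD_foldl_setUpdate F PySem.Dict.empty k]
  simp [PySem.Dict.getD_empty, PySem.Set.update_nil_left]

-- ---- the bucket dict of one group ----

lemma pvByU_keys (g : List (String × String × String)) :
    (pvByU g).keys = PySem.Set.ofList (g.map (fun m => m.1)) := by
  unfold pvByU
  rw [PySem.Dict.keys_foldl_modify_key g (fun m => m.1) []
    (fun d m => fun l => l ++ [m.2.1 ++ "_" ++ m.2.2])]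
  simp [PySem.Dict.keys_empty, PySem.Set.update_nil_left]

lemma pvByU_getD (g : List (String × String × String)) (u : String) :
    (pvByU g).getD u [] = (g.filter (fun m => m.1 == u)).map pvPdb := by
  unfold pvByU
  have : g.foldl (fun d m => d.modify m.1 [] (fun l => l ++ [m.2.1 ++ "_" ++ m.2.2])) PySem.Dict.empty
      = (g.map (fun m => (m.1, pvPdb m))).foldl
          (fun d p => d.modify p.1 [] (fun l => l ++ [p.2])) PySem.Dict.empty := by
    rw [List.foldl_map]; rfl
  rw [this, PySem.Dict.getD_foldl_modify_append]
  simp only [PySem.Dict.getD_empty, List.nil_append, List.filter_map, List.map_map]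
  rfl

lemma pvMem_bucket (g : List (String × String × String)) (u p : String) :
    p ∈ (pvByU g).getD u [] ↔ ∃ m ∈ g, m.1 = u ∧ pvPdb m = p := by
  rw [pvByU_getD]
  constructor
  · intro hp
    rcases List.mem_map.mp hp with ⟨m, hm, hpd⟩
    exact ⟨m, (List.mem_filter.mp hm).1, by simpa using (List.mem_filter.mp hm).2, hpd⟩
  · rintro ⟨m, hm, hu, hpd⟩
    exact List.mem_map.mpr ⟨m, List.mem_filter.mpr ⟨hm, by simp [hu]⟩, hpd⟩

-- ---- KEY ORDER: the two flattened name streams dedup identically ----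

lemma pvPN_cons (u : String) (t : List String) :
    pvPN (u :: t) = t.filterMap (pvNm u) ++ pvPN t := by
  unfold pvPN
  rw [PySem.List.combinations_cons_succ, PySem.List.combinations_one, List.filterMap_append,
    List.map_map, List.filterMap_map]
  rfl

lemma pvKeyStr_symm (u v : String) (h : u ≠ v) : pvKeyStr u v = pvKeyStr v u := by
  unfold pvKeyStr
  rcases lt_trichotomy u v with hlt | he | hgt
  · rw [if_pos hlt, if_neg (not_lt_of_gt hlt)]
  · exact absurd he h
  · rw [if_neg (not_lt_of_gt hgt), if_pos hgt]

lemma pvNm_symm (u v : String) : pvNm u v = pvNm v u := by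
  unfold pvNm
  by_cases h : u = v
  · simp [h]
  · rw [if_neg h, if_neg (Ne.symm h), pvKeyStr_symm u v h]

-- dropping copies of e whose images would already be in s does not change the update
lemma pvDropV (f : String → Option String) (e : String) :
    ∀ (L : List String) (s : PySem.Set String), (∀ n, f e = some n → n ∈ s) →
      PySem.Set.update s (L.filterMap f)
        = PySem.Set.update s ((PySem.Set.discard L e).filterMap f) := by
  intro L
  induction L with
  | nil => intro s _; rfl
  | cons x L' ih =>
    intro s hs
    show PySem.Set.update s (List.filterMap f (x :: L'))
        = PySem.Set.update s ((List.filter (fun y => !(y == e)) (x :: L')).filterMap f)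
    rw [List.filter_cons]
    by_cases hx : x = e
    · subst hx
      simp only [beq_self_eq_true, Bool.not_true, Bool.false_eq_true, if_false]
      rw [List.filterMap_cons]
      cases h : f x with
      | none => exact ih s hs
      | some n =>
        rw [PySem.Set.update_cons, PySem.Set.add_of_mem (hs n h)]
        exact ih s hs
    · have hb : (x == e) = false := by simp [hx]
      simp only [hb, Bool.not_false, if_true]
      rw [List.filterMap_cons, List.filterMap_cons]
      cases h : f x with
      | none => exact ih s hs
      | some n =>
        rw [PySem.Set.update_cons, PySem.Set.update_cons]
        refine ih _ (fun n' h' => ?_)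
        exact (PySem.Set.mem_add _ _ _).mpr (Or.inl (hs n' h'))

-- updating with the filterMap of a list is updating with the filterMap of its dedup
lemma pvGEN2 (f : String → Option String) :
    ∀ (m : List String) (s : PySem.Set String),
      PySem.Set.update s (m.filterMap f)
        = PySem.Set.update s ((PySem.Set.ofList m).filterMap f) := by
  intro m
  induction m with
  | nil => intro s; rfl
  | cons e m' ih =>
    intro s
    rw [PySem.Set.ofList_cons, List.filterMap_cons, List.filterMap_cons]
    cases h : f e with
    | none =>
      rw [ih s, pvDropV f e (PySem.Set.ofList m') s (fun n hn => by rw [h] at hn; cases hn)]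
    | some b =>
      rw [PySem.Set.update_cons, PySem.Set.update_cons, ih (PySem.Set.add s b),
        pvDropV f e (PySem.Set.ofList m') (PySem.Set.add s b)
          (fun n hn => by rw [h] at hn; cases hn; exact (PySem.Set.mem_add _ _ _).mpr (Or.inr rfl))]

lemma pvUpdate_of_forall_mem (s : PySem.Set String) (xs : List String)
    (h : ∀ x ∈ xs, x ∈ s) : PySem.Set.update s xs = s := by
  rw [PySem.Set.update_eq_append_filter]
  have : (PySem.Set.ofList xs).filter (fun y => !(PySem.Set.contains s y)) = [] := by
    rw [List.filter_eq_nil_iff]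
    intro a ha
    have hm : a ∈ s := h a ((PySem.Set.mem_ofList _ _).mp ha)
    simpa using hm
  rw [this, List.append_nil]

lemma pvMem_update_left {s : PySem.Set String} {xs : List String} {x : String}
    (h : x ∈ s) : x ∈ PySem.Set.update s xs :=
  (PySem.Set.mem_update s xs x).mpr (Or.inl h)

-- removing one occurrence of u from the base list only drops pair names already in s
lemma pvC' (u : String) :
    ∀ (l1 l2 : List String) (s : PySem.Set String),
      (∀ v ∈ l1 ++ l2, ∀ n, pvNm u v = some n → n ∈ s) →
      PySem.Set.update s (pvPN (l1 ++ u :: l2)) = PySem.Set.update s (pvPN (l1 ++ l2)) := by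
  intro l1
  induction l1 with
  | nil =>
    intro l2 s hs
    rw [List.nil_append, List.nil_append, pvPN_cons, PySem.Set.update_append]
    congr 1
    refine pvUpdate_of_forall_mem s _ (fun x hx => ?_)
    rcases List.mem_filterMap.mp hx with ⟨v, hv, hn⟩
    exact hs v hv x hn
  | cons x l1' ih =>
    intro l2 s hs
    rw [List.cons_append, List.cons_append, pvPN_cons, pvPN_cons,
      List.filterMap_append, List.filterMap_append, List.filterMap_cons]
    have hxu : ∀ n, pvNm x u = some n → n ∈ s := by
      intro n hn
      rw [pvNm_symm] at hn
      exact hs x (List.mem_append_left _ (List.mem_cons_self)) n hn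
    cases h : pvNm x u with
    | none =>
      rw [PySem.Set.update_append, PySem.Set.update_append, PySem.Set.update_append,
        PySem.Set.update_append]
      refine ih l2 _ (fun v hv n hn => pvMem_update_left (pvMem_update_left (hs v ?_ n hn)))
      rcases List.mem_append.mp hv with h' | h'
      · exact List.mem_append_left _ (List.mem_cons_of_mem _ h')
      · exact List.mem_append_right _ h'
    | some n =>
      rw [PySem.Set.update_append, PySem.Set.update_append, PySem.Set.update_append,
        PySem.Set.update_append, PySem.Set.update_cons,
        PySem.Set.add_of_mem (pvMem_update_left (hxu n h))]
      refine ih l2 _ (fun v hv n' hn' => pvMem_update_left (pvMem_update_left (hs v ?_ n' hn')))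
      rcases List.mem_append.mp hv with h' | h'
      · exact List.mem_append_left _ (List.mem_cons_of_mem _ h')
      · exact List.mem_append_right _ h'

-- discarding u from the base does not change the filterMap through pvNm u
lemma pvFm_discard (L : List String) (u : String) :
    (PySem.Set.discard L u).filterMap (pvNm u) = L.filterMap (pvNm u) := by
  induction L with
  | nil => rfl
  | cons x L' ih =>
    simp only [PySem.Set.discard, List.filter_cons] at ih ⊢
    by_cases hx : x = u
    · subst hx
      have hnone : pvNm x x = none := by simp [pvNm]
      simp only [beq_self_eq_true, Bool.not_true, Bool.false_eq_true, if_false,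
        List.filterMap_cons, hnone]
      exact ih
    · have hb : (x == u) = false := by simp [hx]
      simp only [hb, Bool.not_false, if_true, List.filterMap_cons]
      rw [ih]

-- THE key-order lemma: pair names of a list and of its dedup update any set identically
lemma pvK : ∀ (l : List String) (s : PySem.Set String),
    PySem.Set.update s (pvPN l) = PySem.Set.update s (pvPN (PySem.Set.ofList l)) := by
  intro l
  induction l with
  | nil => intro s; rfl
  | cons u t ih =>
    intro s
    rw [PySem.Set.ofList_cons, pvPN_cons, pvPN_cons, PySem.Set.update_append,
      PySem.Set.update_append]
    have hs12 : PySem.Set.update s (t.filterMap (pvNm u))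
        = PySem.Set.update s (((PySem.Set.ofList t).discard u).filterMap (pvNm u)) := by
      rw [pvGEN2 (pvNm u) t s, pvFm_discard]
    rw [← hs12]
    set s1 := PySem.Set.update s (t.filterMap (pvNm u)) with hs1
    rw [ih s1]
    by_cases hu : u ∈ PySem.Set.ofList t
    · rcases List.append_of_mem hu with ⟨l1, l2, hdec⟩
      have hnd : (l1 ++ u :: l2).Nodup := hdec ▸ PySem.Set.nodup_ofList t
      have hul : u ∉ l1 ++ l2 := (List.nodup_cons.mp (List.nodup_middle.mp hnd)).1
      have hul1 : u ∉ l1 := fun hc => hul (List.mem_append_left _ hc)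
      have hul2 : u ∉ l2 := fun hc => hul (List.mem_append_right _ hc)
      have hdisc : (PySem.Set.discard (PySem.Set.ofList t) u) = l1 ++ l2 := by
        rw [hdec]
        show List.filter (fun y => !(y == u)) (l1 ++ u :: l2) = l1 ++ l2
        rw [List.filter_append, List.filter_cons]
        simp only [beq_self_eq_true, Bool.not_true, Bool.false_eq_true, if_false]
        rw [List.filter_eq_self.mpr (fun a ha => by simp [ne_eq]; exact fun hc => hul1 (hc ▸ ha)),
          List.filter_eq_self.mpr (fun a ha => by simp [ne_eq]; exact fun hc => hul2 (hc ▸ ha))]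
      rw [hdisc, hdec]
      refine pvC' u l1 l2 s1 (fun v hv n hn => ?_)
      have hvD : v ∈ (PySem.Set.discard (PySem.Set.ofList t) u) := by rw [hdisc]; exact hv
      have : n ∈ ((PySem.Set.discard (PySem.Set.ofList t) u).filterMap (pvNm u)) :=
        List.mem_filterMap.mpr ⟨v, hvD, hn⟩
      rw [hs12]
      exact (PySem.Set.mem_update _ _ _).mpr (Or.inr this)
    · have hdisc : (PySem.Set.discard (PySem.Set.ofList t) u) = PySem.Set.ofList t := by
        show List.filter (fun y => !(y == u)) (PySem.Set.ofList t) = PySem.Set.ofList t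
        exact List.filter_eq_self.mpr (fun a ha => by
          simp [ne_eq]; exact fun hc => hu (hc ▸ ha))
      rw [hdisc]

-- A's flattened name stream per group is the pair-name stream of the uniparc list
lemma pvNamesA (g : List (String × String × String)) :
    (pvEvents g).map Prod.fst = pvPN (g.map (fun m => m.1)) := by
  unfold pvEvents pvPN
  rw [List.map_filterMap, PySem.List.combinations_map, List.filterMap_map]
  refine List.filterMap_congr (fun c _ => ?_)
  rcases c with _ | ⟨m0, _ | ⟨m1, _ | t⟩⟩ <;> try rfl
  show (pvEvent m0 m1).map Prod.fst = pvNm m0.1 m1.1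
  unfold pvEvent pvNm pvKeyStr
  by_cases h : m0.1 = m1.1
  · simp [h]
  · by_cases hlt : m0.1 < m1.1
    · simp [h, hlt]
    · simp [h, hlt, Option.map_some]

-- B's name stream per group is the pair-name stream of the (deduped) key list
lemma pvNamesB (g : List (String × String × String)) :
    (pvBlocks g).map Prod.fst = pvPN ((pvByU g).keys) := by
  unfold pvBlocks pvPN
  rw [List.map_filterMap]
  refine List.filterMap_congr (fun c hc => ?_)
  have hnd : ((pvByU g).keys).Nodup := by
    rw [pvByU_keys]; exact PySem.Set.nodup_ofList _
  have hsub := (PySem.List.mem_combinations_iff _ _ _).mp hc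
  rcases c with _ | ⟨u0, _ | ⟨v0, _ | t⟩⟩
  · rfl
  · rfl
  · have hne : u0 ≠ v0 := by
      have : ([u0, v0] : List String).Nodup := hsub.1.nodup hnd
      simpa using (List.nodup_cons.mp this).1
    show ((pvBlk (pvByU g)) [u0, v0]).map Prod.fst = pvNm u0 v0
    unfold pvBlk pvNm pvKeyStr
    by_cases hlt : v0 < u0
    · have : ¬ u0 < v0 := not_lt_of_gt hlt
      simp [hlt, hne, this]
    · have : u0 < v0 := lt_of_le_of_ne (not_lt.mp hlt) hne
      simp [hlt, hne, this]
  · exact absurd hsub.2 (by simp)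

-- the deduped key stream of A equals that of B
lemma pvKeys_eq (groups : List (List (String × String × String))) :
    PySem.Set.ofList ((groups.flatMap pvEvents).map Prod.fst)
      = PySem.Set.ofList ((groups.flatMap pvBlocks).map Prod.fst) := by
  rw [List.map_flatMap, List.map_flatMap]
  have : ∀ (gs : List (List (String × String × String))) (s : PySem.Set String),
      PySem.Set.update s (gs.flatMap (fun g => (pvEvents g).map Prod.fst))
        = PySem.Set.update s (gs.flatMap (fun g => (pvBlocks g).map Prod.fst)) := by
    intro gs
    induction gs with
    | nil => intro s; rfl
    | cons g gs' ih =>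
      intro s
      rw [List.flatMap_cons, List.flatMap_cons, PySem.Set.update_append, PySem.Set.update_append]
      have hg : PySem.Set.update s ((pvEvents g).map Prod.fst)
          = PySem.Set.update s ((pvBlocks g).map Prod.fst) := by
        rw [pvNamesA, pvNamesB, pvByU_keys, pvK]
      rw [hg, ih]
  have h := this groups []
  rw [PySem.Set.update_nil_left, PySem.Set.update_nil_left] at h
  exact h

-- ---- VALUES: membership correspondence between events and blocks ----

lemma pvPair_sublist {α : Type} : ∀ (L : List α) (a b : α), a ∈ L → b ∈ L → a ≠ b →
    ([a, b].Sublist L ∨ [b, a].Sublist L) := by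
  intro L
  induction L with
  | nil => intro a b ha; cases ha
  | cons x L' ih =>
    intro a b ha hb hne
    rcases List.mem_cons.mp ha with hax | ha'
    · subst hax
      have hb' : b ∈ L' := by
        rcases List.mem_cons.mp hb with hbx | h
        · exact absurd hbx.symm hne
        · exact h
      exact Or.inl (List.Sublist.cons₂ a (List.singleton_sublist.mpr hb'))
    · rcases List.mem_cons.mp hb with hbx | hb'
      · subst hbx
        exact Or.inr (List.Sublist.cons₂ b (List.singleton_sublist.mpr ha'))
      · rcases ih a b ha' hb' hne with h | h
        · exact Or.inl (h.cons x)
        · exact Or.inr (h.cons x)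

-- one block's value list membership
lemma pvMem_blk_vals (g : List (String × String × String)) (u v x : String) :
    (x ∈ ((pvByU g).getD u []).flatMap (fun p => ((pvByU g).getD v []).map (fun q => p ++ "-" ++ q)))
      ↔ ∃ p ∈ (pvByU g).getD u [], ∃ q ∈ (pvByU g).getD v [], x = p ++ "-" ++ q := by
  simp [List.mem_flatMap, List.mem_map, eq_comm]

-- any pair of monomers with alphabetically ordered distinct uniparcs yields a block member
lemma pvBlock_exists (g : List (String × String × String)) (a b : String × String × String)
    (ha : a ∈ g) (hb : b ∈ g) (hab : a.1 < b.1) :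
    ∃ vs, (a.1 ++ "-" ++ b.1, vs) ∈ pvBlocks g ∧ (pvPdb a ++ "-" ++ pvPdb b) ∈ vs := by
  have hu : a.1 ∈ (pvByU g).keys := by
    rw [pvByU_keys, PySem.Set.mem_ofList]
    exact List.mem_map.mpr ⟨a, ha, rfl⟩
  have hv : b.1 ∈ (pvByU g).keys := by
    rw [pvByU_keys, PySem.Set.mem_ofList]
    exact List.mem_map.mpr ⟨b, hb, rfl⟩
  have hne : a.1 ≠ b.1 := ne_of_lt hab
  have hvals : (pvPdb a ++ "-" ++ pvPdb b)
      ∈ ((pvByU g).getD a.1 []).flatMap (fun p => ((pvByU g).getD b.1 []).map (fun q => p ++ "-" ++ q)) := by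
    refine List.mem_flatMap.mpr ⟨pvPdb a, ?_, List.mem_map.mpr ⟨pvPdb b, ?_, rfl⟩⟩
    · exact (pvMem_bucket g a.1 (pvPdb a)).mpr ⟨a, ha, rfl, rfl⟩
    · exact (pvMem_bucket g b.1 (pvPdb b)).mpr ⟨b, hb, rfl, rfl⟩
  refine ⟨_, ?_, hvals⟩
  rcases pvPair_sublist (pvByU g).keys a.1 b.1 hu hv hne with hsub | hsub
  · refine List.mem_filterMap.mpr ⟨[a.1, b.1],
      (PySem.List.mem_combinations_iff _ _ _).mpr ⟨hsub, rfl⟩, ?_⟩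
    show some _ = some _
    simp [not_lt_of_gt hab]
  · refine List.mem_filterMap.mpr ⟨[b.1, a.1],
      (PySem.List.mem_combinations_iff _ _ _).mpr ⟨hsub, rfl⟩, ?_⟩
    show some _ = some _
    simp [hab]

-- and (in either order) an event
lemma pvEvent_exists (g : List (String × String × String)) (a b : String × String × String)
    (ha : a ∈ g) (hb : b ∈ g) (hab : a.1 < b.1) :
    ((a.1 ++ "-" ++ b.1, pvPdb a ++ "-" ++ pvPdb b) ∈ pvEvents g) := by
  have hne : a ≠ b := fun hc => absurd (congrArg Prod.fst hc) (ne_of_lt hab)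
  rcases pvPair_sublist g a b ha hb hne with hsub | hsub
  · refine List.mem_filterMap.mpr ⟨[a, b],
      (PySem.List.mem_combinations_iff _ _ _).mpr ⟨hsub, rfl⟩, ?_⟩
    show pvEvent a b = _
    rw [pvEvent, if_neg (ne_of_lt hab), if_pos hab]
    rfl
  · refine List.mem_filterMap.mpr ⟨[b, a],
      (PySem.List.mem_combinations_iff _ _ _).mpr ⟨hsub, rfl⟩, ?_⟩
    show pvEvent b a = _
    rw [pvEvent, if_neg (Ne.symm (ne_of_lt hab)), if_neg (not_lt_of_gt hab)]
    rfl

-- the per-group membership correspondence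
lemma pvMemEB (g : List (String × String × String)) (k v : String) :
    ((k, v) ∈ pvEvents g) ↔ ∃ vs, (k, vs) ∈ pvBlocks g ∧ v ∈ vs := by
  constructor
  · intro hkv
    rcases List.mem_filterMap.mp hkv with ⟨c, hc, he⟩
    rcases (PySem.List.mem_combinations_iff _ _ _).mp hc with ⟨hsub, hlen⟩
    rcases c with _ | ⟨m0, _ | ⟨m1, _ | t⟩⟩ <;> simp at hlen
    have hm0 : m0 ∈ g := hsub.subset (List.mem_cons_self)
    have hm1 : m1 ∈ g := hsub.subset (List.mem_cons_of_mem _ List.mem_cons_self)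
    have he' : pvEvent m0 m1 = some (k, v) := he
    rw [pvEvent] at he'
    by_cases h01 : m0.1 = m1.1
    · rw [if_pos h01] at he'; cases he'
    · rw [if_neg h01] at he'
      by_cases hlt : m0.1 < m1.1
      · rw [if_pos hlt] at he'
        rcases Option.some.inj he' with h
        have hk : k = m0.1 ++ "-" ++ m1.1 := (congrArg Prod.fst h).symm
        have hv : v = pvPdb m0 ++ "-" ++ pvPdb m1 := (congrArg Prod.snd h).symm
        rw [hk, hv]
        exact pvBlock_exists g m0 m1 hm0 hm1 hlt
      · have hgt : m1.1 < m0.1 := lt_of_le_of_ne (not_lt.mp hlt) (fun hc => h01 hc.symm)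
        rw [if_neg hlt] at he'
        rcases Option.some.inj he' with h
        have hk : k = m1.1 ++ "-" ++ m0.1 := (congrArg Prod.fst h).symm
        have hv : v = pvPdb m1 ++ "-" ++ pvPdb m0 := (congrArg Prod.snd h).symm
        rw [hk, hv]
        exact pvBlock_exists g m1 m0 hm1 hm0 hgt
  · rintro ⟨vs, hvs, hv⟩
    rcases List.mem_filterMap.mp hvs with ⟨c, hc, hb⟩
    rcases (PySem.List.mem_combinations_iff _ _ _).mp hc with ⟨hsub, hlen⟩
    rcases c with _ | ⟨u0, _ | ⟨v0, _ | t⟩⟩ <;> simp at hlen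
    have hnd : ((pvByU g).keys).Nodup := by
      rw [pvByU_keys]; exact PySem.Set.nodup_ofList _
    have hne : u0 ≠ v0 := by
      have : ([u0, v0] : List String).Nodup := hsub.nodup hnd
      simpa using (List.nodup_cons.mp this).1
    have hb' : pvBlk (pvByU g) [u0, v0] = some (k, vs) := hb
    rw [pvBlk] at hb'
    have key : ∀ (u' v' : String), u' < v' →
        (u' ++ "-" ++ v',
          ((pvByU g).getD u' []).flatMap (fun p => ((pvByU g).getD v' []).map (fun q => p ++ "-" ++ q)))
          = (k, vs) →
        (k, v) ∈ pvEvents g := by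
      intro u' v' huv hkv
      have hk : k = u' ++ "-" ++ v' := (congrArg Prod.fst hkv).symm
      have hvs' : vs = ((pvByU g).getD u' []).flatMap
          (fun p => ((pvByU g).getD v' []).map (fun q => p ++ "-" ++ q)) := (congrArg Prod.snd hkv).symm
      rw [hvs'] at hv
      rcases (pvMem_blk_vals g u' v' v).mp hv with ⟨p, hp, q, hq, hpq⟩
      rcases (pvMem_bucket g u' p).mp hp with ⟨m0, hm0, hm0u, hm0p⟩
      rcases (pvMem_bucket g v' q).mp hq with ⟨m1, hm1, hm1v, hm1q⟩
      have := pvEvent_exists g m0 m1 hm0 hm1 (by rw [hm0u, hm1v]; exact huv)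
      rw [hm0u, hm1v, hm0p, hm1q, ← hk, ← hpq] at this
      exact this
    by_cases hlt : v0 < u0
    · rw [if_pos hlt] at hb'
      rw [if_pos hlt] at hb'
      exact key v0 u0 hlt (Option.some.inj hb')
    · have huv : u0 < v0 := lt_of_le_of_ne (not_lt.mp hlt) hne
      rw [if_neg hlt] at hb'
      rw [if_neg hlt] at hb'
      exact key u0 v0 huv (Option.some.inj hb')

-- ---- final assembly ----

lemma pvCanon_eq_canonB (groups : List (List (String × String × String))) :
    pvCanon (groups.flatMap pvEvents) = pvCanonB (groups.flatMap pvBlocks) := by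
  unfold pvCanon pvCanonB
  rw [pvKeys_eq]
  refine List.map_congr_left (fun k hk => ?_)
  have hmem : ∀ x : String,
      (x ∈ PySem.Set.ofList (((groups.flatMap pvEvents).filter (fun p => p.1 == k)).map Prod.snd))
        ↔ (x ∈ PySem.Set.ofList ((((groups.flatMap pvBlocks).filter (fun b => b.1 == k)).map Prod.snd).flatten)) := by
    intro x
    rw [PySem.Set.mem_ofList, PySem.Set.mem_ofList]
    constructor
    · intro hx
      rcases List.mem_map.mp hx with ⟨e, he, hsnd⟩
      have hek : e.1 = k := by simpa using (List.mem_filter.mp he).2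
      have heE : e ∈ groups.flatMap pvEvents := (List.mem_filter.mp he).1
      rcases List.mem_flatMap.mp heE with ⟨g, hg, hge⟩
      have : (k, x) ∈ pvEvents g := by
        have : e = (k, x) := by
          cases e; simp at hek hsnd; simp [hek, hsnd]
        exact this ▸ hge
      rcases (pvMemEB g k x).mp this with ⟨vs, hvs, hxvs⟩
      refine List.mem_flatten.mpr ⟨vs, ?_, hxvs⟩
      refine List.mem_map.mpr ⟨(k, vs), ?_, rfl⟩
      refine List.mem_filter.mpr ⟨List.mem_flatMap.mpr ⟨g, hg, hvs⟩, by simp⟩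
    · intro hx
      rcases List.mem_flatten.mp hx with ⟨vs, hvs, hxvs⟩
      rcases List.mem_map.mp hvs with ⟨b, hb, hsnd⟩
      have hbk : b.1 = k := by simpa using (List.mem_filter.mp hb).2
      have hbF : b ∈ groups.flatMap pvBlocks := (List.mem_filter.mp hb).1
      rcases List.mem_flatMap.mp hbF with ⟨g, hg, hgb⟩
      have hb' : (k, vs) ∈ pvBlocks g := by
        have : b = (k, vs) := by
          cases b; simp at hbk hsnd; simp [hbk, hsnd]
        exact this ▸ hgb
      have : (k, x) ∈ pvEvents g := (pvMemEB g k x).mpr ⟨vs, hb', hxvs⟩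
      refine List.mem_map.mpr ⟨(k, x), ?_, rfl⟩
      refine List.mem_filter.mpr ⟨List.mem_flatMap.mpr ⟨g, hg, this⟩, by simp⟩
  have hperm : (PySem.Set.ofList (((groups.flatMap pvEvents).filter (fun p => p.1 == k)).map Prod.snd)).Perm
      (PySem.Set.ofList ((((groups.flatMap pvBlocks).filter (fun b => b.1 == k)).map Prod.snd).flatten)) :=
    (List.perm_ext_iff_of_nodup (PySem.Set.nodup_ofList _) (PySem.Set.nodup_ofList _)).mpr hmem
  rw [Prod.mk.injEq]
  exact ⟨rfl, (PySem.List.sorted_id_eq_sorted_id_iff_perm _ _).mpr hperm⟩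

-- ===== VERDICT (by name: the statement is the Claim_ definition above) =====
theorem derive_heterodimers_from_assembly_groups_spec : Claim_equal_derive_heterodimers_from_assembly_groups := by
  intro groups _
  unfold Spec_derive_heterodimers_from_assembly_groups
  rw [pvA_eq_canon, pvB_eq_canonB, pvCanon_eq_canonB]
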